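-- pv_equiv track=rewrite | github.com/CommonRoad/commonroad-reactive-planner | src/removal/utils.py | binary_search_indices
-- ===== SOURCE A (Python) =====
-- def binary_search_indices(full_range):
--     """
--     Returns a list of the visited indices in the order they were visited.A recursive function.
--     :param full_range: a list containing all the integer numbers of the set.
--     :return: list of visited indices
--     """
--     full_range_list = list(full_range)
--     if len(full_range_list) == 2:
--         return []
--     middle = (full_range_list[0] + full_range_list[-1]) // 2
--     result = [middle]
--     upper_range = range(middle, full_range_list[-1] + 1)
--     lower_range = range(full_range_list[0], middle + 1)
--     result = result + binary_search_indices(upper_range)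
--     result = result + binary_search_indices(lower_range)
--     return result
-- ===== SOURCE B (Python) =====
-- def binary_search_indices(full_range):
--     full_range_list = list(full_range)
--     result = []
--     stack = [(full_range_list[0], full_range_list[-1], len(full_range_list))]
--     while stack:
--         lo, hi, n = stack.pop()
--         if n == 2:
--             continue
--         middle = (lo + hi) // 2
--         result.append(middle)
--         stack.append((lo, middle, middle - lo + 1))
--         stack.append((middle, hi, hi - middle + 1))
--     return result
-- ===== Notes on version B (the rewrite author's own statement) =====
-- stated objective: faster
-- what changed: Replaces A's recursion (which materializes each sub-range into a fresh list at every level) by a single iterative while-loop over an explicit stack of (lo, hi, length) triples, pushing lower then upper so the upper half is emitted first, reproducing A's preorder exactly without building any range lists.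
import Mathlib
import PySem

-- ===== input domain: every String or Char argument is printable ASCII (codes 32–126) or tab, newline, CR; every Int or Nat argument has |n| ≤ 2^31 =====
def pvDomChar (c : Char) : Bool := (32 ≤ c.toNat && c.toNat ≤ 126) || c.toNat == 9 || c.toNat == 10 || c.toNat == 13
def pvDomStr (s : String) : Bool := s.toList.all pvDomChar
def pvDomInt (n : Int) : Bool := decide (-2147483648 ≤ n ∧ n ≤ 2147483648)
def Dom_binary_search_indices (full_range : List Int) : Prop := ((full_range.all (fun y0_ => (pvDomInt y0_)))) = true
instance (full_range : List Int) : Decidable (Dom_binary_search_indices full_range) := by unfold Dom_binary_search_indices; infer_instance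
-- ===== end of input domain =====

-- B replaces A's recursion (which builds a fresh list per sub-range) by an explicit stack loop over (lo, hi, length) triples (same preorder output); measured faster in a timing run.

-- ===== PORT A =====
-- midpoint bracket used by goA's termination proof (cited by name in decreasing_by)
lemma pvMid (lo hi : Int) (h : lo + 2 ≤ hi) :
    lo + 1 ≤ PySem.Int.floordiv (lo + hi) 2 ∧ PySem.Int.floordiv (lo + hi) 2 + 1 ≤ hi := by
  have h1 := PySem.Int.floordiv_mul_add_mod (lo + hi) 2
  have h2 := PySem.Int.mod_nonneg (lo + hi) (b := 2) (by norm_num)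
  have h3 := PySem.Int.mod_lt (lo + hi) (b := 2) (by norm_num)
  omega

-- A's recursion on the contiguous ranges range(lo, hi+1) it builds; the 'hi - lo ≤ 1'
-- guard covers exactly len==2 (hi-lo=1) plus, for totality, the degenerate spans on
-- which Python raises or recurses forever (outside Pre_).
def goA (lo hi : Int) : List Int :=
  if _h : hi - lo ≤ 1 then []
  else
    let m := PySem.Int.floordiv (lo + hi) 2
    [m] ++ goA m hi ++ goA lo m
termination_by (hi - lo).toNat
decreasing_by
  · have := pvMid lo hi (by omega); omega
  · have := pvMid lo hi (by omega); omega

def binary_search_indices (full_range : List Int) : List Int :=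
  if full_range.length = 2 then []
  else
    match PySem.List.pyGet? full_range 0, PySem.List.pyGet? full_range (-1) with
    | some f, some l =>
      let m := PySem.Int.floordiv (f + l) 2
      [m] ++ goA m l ++ goA f m
    | _, _ => []   -- empty list: Python raises IndexError (outside Pre_)

-- ===== PORT B =====
-- Source B's while loop over the explicit stack; fuel is only a totality guard (proved
-- sufficient on Pre_), the loop body is Source B's step for step.
def loopB : Nat → List (Int × Int × Int) → List Int → List Int
  | 0, _, res => res
  | _ + 1, [], res => res
  | fuel + 1, (lo, hi, n) :: rest, res =>
    if n = 2 then loopB fuel rest res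
    else
      let m := PySem.Int.floordiv (lo + hi) 2
      loopB fuel ((m, hi, hi - m + 1) :: (lo, m, m - lo + 1) :: rest) (res ++ [m])

def binary_search_indices_alt (full_range : List Int) : List Int :=
  match PySem.List.pyGet? full_range 0 with
  | none => []   -- empty list: Python raises IndexError (outside Pre_)
  | some f =>
    match PySem.List.pyGet? full_range (-1) with
    | none => []
    | some l => loopB (2 * (l - f).toNat + 1) [(f, l, (full_range.length : Int))] []

-- ===== PRECONDITION & SPEC =====
-- Pre_ excludes exactly the inputs on which A never returns: the empty list (IndexError)
-- and lists with last - first ≤ 1 of length ≠ 2 (infinite recursion / RecursionError).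
def Pre_binary_search_indices (full_range : List Int) : Prop :=
  full_range.length = 2 ∨ (full_range ≠ [] ∧ full_range.getLastD 0 - full_range.headD 0 ≥ 2)
instance (full_range : List Int) : Decidable (Pre_binary_search_indices full_range) := by
  unfold Pre_binary_search_indices; infer_instance
def pvWitness_binary_search_indices : List Int := [0, 1, 2, 3, 4]
def Spec_binary_search_indices (full_range : List Int) (out : List Int) : Prop := out = binary_search_indices_alt full_range
instance (full_range : List Int) (out : List Int) : Decidable (Spec_binary_search_indices full_range out) := by unfold Spec_binary_search_indices; infer_instance

-- ===== CLAIM (what is proved, stated in full; the proofs are below) =====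
def Claim_equal_binary_search_indices : Prop := ∀ (full_range : List Int), Dom_binary_search_indices full_range → Pre_binary_search_indices full_range → Spec_binary_search_indices full_range (binary_search_indices full_range)

-- ===== LEMMAS AND PROOFS =====

-- an entry is a genuine range descriptor: recorded length = span + 1, span ≥ 1
def pvGood (e : Int × Int × Int) : Prop := e.2.2 = e.2.1 - e.1 + 1 ∧ 1 ≤ e.2.1 - e.1

def pvCost (e : Int × Int × Int) : Nat := (2 * (e.2.1 - e.1) - 1).toNat

lemma loopB_nil : ∀ (fuel : Nat) (res : List Int), loopB fuel [] res = res
  | 0, _ => rfl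
  | _ + 1, _ => rfl

lemma loopB_eq : ∀ (fuel : Nat) (stack : List (Int × Int × Int)) (res : List Int),
    (∀ e ∈ stack, pvGood e) → (stack.map pvCost).sum ≤ fuel →
    loopB fuel stack res = res ++ (stack.map (fun e => goA e.1 e.2.1)).flatten := by
  intro fuel
  induction fuel with
  | zero =>
    intro stack res hg hc
    match stack with
    | [] => simp [loopB]
    | (lo, hi, n) :: rest =>
      exfalso
      have h1 : (1:Int) ≤ hi - lo := (hg _ (List.mem_cons_self ..)).2
      have h2 : pvCost (lo, hi, n) + (rest.map pvCost).sum ≤ 0 := by simpa using hc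
      have h3 : pvCost (lo, hi, n) = (2 * (hi - lo) - 1).toNat := rfl
      omega
  | succ fuel ih =>
    intro stack res hg hc
    match stack with
    | [] => simp [loopB]
    | (lo, hi, n) :: rest =>
      have hn : n = hi - lo + 1 := (hg _ (List.mem_cons_self ..)).1
      have hsp : (1:Int) ≤ hi - lo := (hg _ (List.mem_cons_self ..)).2
      have hc' : pvCost (lo, hi, n) + (rest.map pvCost).sum ≤ fuel + 1 := by simpa using hc
      have hcv : pvCost (lo, hi, n) = (2 * (hi - lo) - 1).toNat := rfl
      by_cases hone : hi - lo ≤ 1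
      · -- span = 1, so n = 2: pop and continue
        have hn2 : n = 2 := by omega
        rw [loopB, if_pos hn2]
        rw [ih rest res (fun e he => hg e (List.mem_cons_of_mem _ he)) (by omega)]
        have : goA lo hi = [] := by rw [goA]; simp [hone]
        simp [this]
      · -- split
        have hsp2 : lo + 2 ≤ hi := by omega
        have hm := pvMid lo hi hsp2
        have hn2 : ¬ n = 2 := by omega
        rw [loopB, if_neg hn2]
        set m := PySem.Int.floordiv (lo + hi) 2 with hmdef
        have hgood' : ∀ e ∈ (m, hi, hi - m + 1) :: (lo, m, m - lo + 1) :: rest, pvGood e := by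
          intro e he
          simp only [List.mem_cons] at he
          rcases he with rfl | rfl | he
          · exact ⟨rfl, show (1:Int) ≤ hi - m by omega⟩
          · exact ⟨rfl, show (1:Int) ≤ m - lo by omega⟩
          · exact hg e (List.mem_cons_of_mem _ he)
        have hcost' : (((m, hi, hi - m + 1) :: (lo, m, m - lo + 1) :: rest).map pvCost).sum ≤ fuel := by
          have e1 : pvCost (m, hi, hi - m + 1) = (2 * (hi - m) - 1).toNat := rfl
          have e2 : pvCost (lo, m, m - lo + 1) = (2 * (m - lo) - 1).toNat := rfl
          simp only [List.map_cons, List.sum_cons, e1, e2]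
          omega
        rw [ih _ _ hgood' hcost']
        have hA : goA lo hi = [m] ++ goA m hi ++ goA lo m := by
          rw [goA]; simp [hone, hmdef]
        simp [hA]


lemma loopB_top (f l n : Int) (hn : ¬ n = 2) (hsp : f + 2 ≤ l) :
    loopB (2 * (l - f).toNat + 1) [(f, l, n)] [] =
      [PySem.Int.floordiv (f + l) 2] ++ goA (PySem.Int.floordiv (f + l) 2) l
        ++ goA f (PySem.Int.floordiv (f + l) 2) := by
  have hm := pvMid f l hsp
  rw [loopB, if_neg hn]
  rw [loopB_eq (2 * (l - f).toNat) _ _ (by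
      intro e he
      simp only [List.mem_cons] at he
      rcases he with rfl | rfl | he
      · exact ⟨rfl, show (1:Int) ≤ l - PySem.Int.floordiv (f + l) 2 by omega⟩
      · exact ⟨rfl, show (1:Int) ≤ PySem.Int.floordiv (f + l) 2 - f by omega⟩
      · simp at he)
    (by
      have e1 : pvCost (PySem.Int.floordiv (f + l) 2, l,
          l - PySem.Int.floordiv (f + l) 2 + 1) = (2 * (l - PySem.Int.floordiv (f + l) 2) - 1).toNat := rfl
      have e2 : pvCost (f, PySem.Int.floordiv (f + l) 2,
          PySem.Int.floordiv (f + l) 2 - f + 1) = (2 * (PySem.Int.floordiv (f + l) 2 - f) - 1).toNat := rfl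
      simp only [List.map_cons, List.sum_cons, List.map_nil, List.sum_nil, e1, e2]
      omega)]
  simp

-- ===== VERDICT (by name: the statement is the Claim_ definition above) =====

theorem binary_search_indices_spec : Claim_equal_binary_search_indices := by
  intro xs _dom pre
  unfold Spec_binary_search_indices
  by_cases hlen : xs.length = 2
  · -- both return []
    obtain ⟨a, t, rfl⟩ : ∃ a t, xs = a :: t := by
      cases xs with
      | nil => simp at hlen
      | cons a t => exact ⟨a, t, rfl⟩
    obtain ⟨b, u, rfl⟩ : ∃ b u, t = b :: u := by
      cases t with
      | nil => simp at hlen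
      | cons b u => exact ⟨b, u, rfl⟩
    have hu : u = [] := by simpa using hlen
    subst hu
    rw [binary_search_indices, if_pos hlen]
    rw [binary_search_indices_alt]
    simp only [PySem.List.pyGet?_zero_cons, PySem.List.pyGet?_neg_one, List.getLast?]
    rw [loopB]
    norm_num
    exact loopB_nil _ _
  · have ⟨hne, hspan⟩ := pre.resolve_left hlen
    obtain ⟨x, t, rfl⟩ : ∃ x t, xs = x :: t := by
      cases xs with
      | nil => exact absurd rfl hne
      | cons x t => exact ⟨x, t, rfl⟩
    have hlast : (x :: t).getLastD 0 = (x :: t).getLast (by simp) := by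
      simp [List.getLastD_eq_getLast?, List.getLast?_eq_some_getLast]
    have hspan' : x + 2 ≤ (x :: t).getLast (by simp) := by
      have h := hspan
      rw [hlast] at h
      simp only [List.headD_cons] at h
      omega
    have hget0 : PySem.List.pyGet? (x :: t) 0 = some x := PySem.List.pyGet?_zero_cons ..
    have hgetm1 : PySem.List.pyGet? (x :: t) (-1) = some ((x :: t).getLast (by simp)) := by
      rw [PySem.List.pyGet?_neg_one, List.getLast?_eq_some_getLast]
    rw [binary_search_indices, if_neg hlen, binary_search_indices_alt, hget0, hgetm1]
    exact (loopB_top x ((x :: t).getLast (by simp)) ((x :: t).length : Int)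
      (by exact_mod_cast hlen) hspan').symm
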